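-- pv_equiv track=rewrite | github.com/bodiana/myipnow | related_art.py | generate_pagination
-- ===== SOURCE A (Python) =====
-- def generate_pagination(current_index, total_pages, pages):
--     """Return desktop + mobile pagination HTML as string."""
--     # Desktop pagination: show previous, next, and some page numbers
--     desktop_html = '<nav aria-label="Page navigation" class="pagination desktop-pagination">\n'
--
--     if current_index > 0:
--         desktop_html += f'<a href="{pages[current_index-1]}">← Previous</a> '
--     else:
--         desktop_html += f'<span class="disabled">← Previous</span> '
--
--     # Show first, last, current +-2, with ellipsis if needed
--     for i, page in enumerate(pages):
--         page_num = i + 1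
--         if page_num == 1 or page_num == total_pages or abs(i - current_index) <= 2:
--             if i == current_index:
--                 desktop_html += f'<span class="current">{page_num}</span> '
--             else:
--                 desktop_html += f'<a href="{page}">{page_num}</a> '
--         elif i == 1 and current_index > 3:
--             desktop_html += '<span>…</span> '
--         elif i == total_pages - 2 and current_index < total_pages - 4:
--             desktop_html += '<span>…</span> '
--
--     if current_index < total_pages - 1:
--         desktop_html += f'<a href="{pages[current_index+1]}">Next →</a>'
--     else:
--         desktop_html += f'<span class="disabled">Next →</span>'
--     desktop_html += '</nav>\n'
--
--     # Mobile pagination: only prev / current / next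
--     mobile_html = '<nav aria-label="Page navigation" class="pagination mobile-pagination">\n'
--     if current_index > 0:
--         mobile_html += f'<a href="{pages[current_index-1]}">← Prev</a>'
--     else:
--         mobile_html += f'<span class="disabled">← Prev</span>'
--     mobile_html += f'<span class="current">{current_index+1} / {total_pages}</span>'
--     if current_index < total_pages - 1:
--         mobile_html += f'<a href="{pages[current_index+1]}">Next →</a>'
--     else:
--         mobile_html += f'<span class="disabled">Next →</span>'
--     mobile_html += '\n</nav>'
--
--     return desktop_html + mobile_html
-- ===== SOURCE B (Python) =====
-- def generate_pagination(current_index, total_pages, pages):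
--     """Return desktop + mobile pagination HTML as string (O(1) in total_pages:
--     only the constant set of candidate indices is visited, not every page)."""
--     n = len(pages)
--     ci, tp = current_index, total_pages
--
--     if ci > 0:
--         prev_d = f'<a href="{pages[ci-1]}">← Previous</a> '
--         prev_m = f'<a href="{pages[ci-1]}">← Prev</a>'
--     else:
--         prev_d = '<span class="disabled">← Previous</span> '
--         prev_m = '<span class="disabled">← Prev</span>'
--     if ci < tp - 1:
--         nxt_page = pages[ci+1]
--         nxt_d = f'<a href="{nxt_page}">Next →</a>'
--         nxt_m = f'<a href="{nxt_page}">Next →</a>'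
--     else:
--         nxt_d = '<span class="disabled">Next →</span>'
--         nxt_m = '<span class="disabled">Next →</span>'
--
--     def render(i):
--         if i == 0 or i + 1 == tp or abs(i - ci) <= 2:
--             if i == ci:
--                 return f'<span class="current">{i+1}</span> '
--             return f'<a href="{pages[i]}">{i+1}</a> '
--         if i == 1 and ci > 3:
--             return '<span>…</span> '
--         if i == tp - 2 and ci < tp - 4:
--             return '<span>…</span> '
--         return ''
--
--     cand = sorted({i for i in (0, 1, ci - 2, ci - 1, ci, ci + 1, ci + 2, tp - 2, tp - 1)
--                    if 0 <= i < n})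
--     middle = ''.join(render(i) for i in cand)
--
--     return ('<nav aria-label="Page navigation" class="pagination desktop-pagination">\n'
--             + prev_d + middle + nxt_d + '</nav>\n'
--             + '<nav aria-label="Page navigation" class="pagination mobile-pagination">\n'
--             + prev_m + f'<span class="current">{ci+1} / {tp}</span>' + nxt_m + '\n</nav>')
-- ===== Notes on version B (the rewrite author's own statement) =====
-- stated objective: faster
-- what changed: Instead of scanning every page to decide which of them to print, B computes the constant-size candidate index set {0, 1, current_index-2..current_index+2, total_pages-2, total_pages-1}, clips it to range, sorts/dedups it and renders only those indices, so the desktop loop is O(1) instead of O(len(pages)).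
import Mathlib
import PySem

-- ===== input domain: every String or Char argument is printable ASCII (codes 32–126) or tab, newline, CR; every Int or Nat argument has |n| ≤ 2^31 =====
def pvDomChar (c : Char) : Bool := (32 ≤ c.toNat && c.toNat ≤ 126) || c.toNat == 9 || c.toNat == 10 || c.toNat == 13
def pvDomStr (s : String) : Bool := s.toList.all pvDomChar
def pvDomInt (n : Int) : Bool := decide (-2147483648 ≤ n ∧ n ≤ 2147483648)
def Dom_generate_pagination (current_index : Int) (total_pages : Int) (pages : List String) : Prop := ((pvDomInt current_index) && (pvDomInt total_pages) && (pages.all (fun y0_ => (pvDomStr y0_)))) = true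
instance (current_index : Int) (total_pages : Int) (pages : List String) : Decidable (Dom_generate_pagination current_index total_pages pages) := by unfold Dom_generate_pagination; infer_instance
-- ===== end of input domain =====

-- B re-implements the desktop page loop in O(1): it renders only the constant candidate
-- index set {0, 1, ci-2..ci+2, tp-2, tp-1} (clipped to range, sorted and deduplicated)
-- instead of scanning every page as A does.  Equivalence of the return values is proved
-- on Pre_ (the inputs where A's two prev/next indexings do not raise IndexError).

-- ===== PORT A =====
-- A's loop body, named so the proofs can speak about it (a literal transcription of the
-- for-loop body; `p` is the (i, page) pair from enumerate).
def pvStepA (ci tp : Int) (acc : String) (p : Int × String) : String :=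
  -- i = p.1, page = p.2, page_num = p.1 + 1 (Python's loop locals, inlined)
  if p.1 + 1 = 1 ∨ p.1 + 1 = tp ∨ |p.1 - ci| ≤ 2 then
    if p.1 = ci then
      acc ++ ("<span class=\"current\">" ++ PySem.Int.toStr (p.1 + 1) ++ "</span> ")
    else
      acc ++ ("<a href=\"" ++ p.2 ++ "\">" ++ PySem.Int.toStr (p.1 + 1) ++ "</a> ")
  else if p.1 = 1 ∧ ci > 3 then
    acc ++ "<span>…</span> "
  else if p.1 = tp - 2 ∧ ci < tp - 4 then
    acc ++ "<span>…</span> "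
  else
    acc

def generate_pagination (current_index : Int) (total_pages : Int) (pages : List String) : String :=
  let desktop_html := "<nav aria-label=\"Page navigation\" class=\"pagination desktop-pagination\">\n"
  -- pages[current_index-1]: pyGetD is exact here under Pre_ (IndexError excluded)
  let desktop_html := if current_index > 0 then
      desktop_html ++ ("<a href=\"" ++ PySem.List.pyGetD pages (current_index - 1) "" ++ "\">← Previous</a> ")
    else
      desktop_html ++ "<span class=\"disabled\">← Previous</span> "
  let desktop_html := (PySem.List.enumerate pages).foldl (pvStepA current_index total_pages) desktop_html
  let desktop_html := if current_index < total_pages - 1 then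
      desktop_html ++ ("<a href=\"" ++ PySem.List.pyGetD pages (current_index + 1) "" ++ "\">Next →</a>")
    else
      desktop_html ++ "<span class=\"disabled\">Next →</span>"
  let desktop_html := desktop_html ++ "</nav>\n"
  let mobile_html := "<nav aria-label=\"Page navigation\" class=\"pagination mobile-pagination\">\n"
  let mobile_html := if current_index > 0 then
      mobile_html ++ ("<a href=\"" ++ PySem.List.pyGetD pages (current_index - 1) "" ++ "\">← Prev</a>")
    else
      mobile_html ++ "<span class=\"disabled\">← Prev</span>"
  let mobile_html := mobile_html ++ ("<span class=\"current\">" ++ PySem.Int.toStr (current_index + 1) ++ " / " ++ PySem.Int.toStr total_pages ++ "</span>")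
  let mobile_html := if current_index < total_pages - 1 then
      mobile_html ++ ("<a href=\"" ++ PySem.List.pyGetD pages (current_index + 1) "" ++ "\">Next →</a>")
    else
      mobile_html ++ "<span class=\"disabled\">Next →</span>"
  let mobile_html := mobile_html ++ "\n</nav>"
  desktop_html ++ mobile_html

-- ===== PORT B =====
-- Source B's helper `render(i)` (pages[i] is only reached with 0 ≤ i < len pages).
def pvRenderB (ci tp : Int) (pages : List String) (i : Int) : String :=
  if i = 0 ∨ i + 1 = tp ∨ |i - ci| ≤ 2 then
    if i = ci then
      "<span class=\"current\">" ++ PySem.Int.toStr (i + 1) ++ "</span> "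
    else
      "<a href=\"" ++ PySem.List.pyGetD pages i "" ++ "\">" ++ PySem.Int.toStr (i + 1) ++ "</a> "
  else if i = 1 ∧ ci > 3 then
    "<span>…</span> "
  else if i = tp - 2 ∧ ci < tp - 4 then
    "<span>…</span> "
  else
    ""

def generate_pagination_alt (current_index : Int) (total_pages : Int) (pages : List String) : String :=
  let n : Int := (pages.length : Int)
  let ci := current_index
  let tp := total_pages
  let prev_d := if ci > 0 then
      "<a href=\"" ++ PySem.List.pyGetD pages (ci - 1) "" ++ "\">← Previous</a> "
    else "<span class=\"disabled\">← Previous</span> "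
  let prev_m := if ci > 0 then
      "<a href=\"" ++ PySem.List.pyGetD pages (ci - 1) "" ++ "\">← Prev</a>"
    else "<span class=\"disabled\">← Prev</span>"
  let nxt_d := if ci < tp - 1 then
      "<a href=\"" ++ PySem.List.pyGetD pages (ci + 1) "" ++ "\">Next →</a>"
    else "<span class=\"disabled\">Next →</span>"
  let nxt_m := if ci < tp - 1 then
      "<a href=\"" ++ PySem.List.pyGetD pages (ci + 1) "" ++ "\">Next →</a>"
    else "<span class=\"disabled\">Next →</span>"
  -- cand = sorted({i for i in (...) if 0 <= i < n})  (sorted(set) of the 9-tuple)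
  let cand := PySem.List.sorted
      (PySem.Set.ofList (([0, 1, ci - 2, ci - 1, ci, ci + 1, ci + 2, tp - 2, tp - 1] : List Int).filter
        (fun i => decide (0 ≤ i ∧ i < n))))
      (fun x => x)
  -- ''.join(render(i) for i in cand)  (ported by hand as left-fold concatenation — exact)
  let middle := (cand.map (pvRenderB ci tp pages)).foldl (· ++ ·) ""
  "<nav aria-label=\"Page navigation\" class=\"pagination desktop-pagination\">\n"
    ++ prev_d ++ middle ++ nxt_d ++ "</nav>\n"
    ++ "<nav aria-label=\"Page navigation\" class=\"pagination mobile-pagination\">\n"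
    ++ prev_m ++ ("<span class=\"current\">" ++ PySem.Int.toStr (ci + 1) ++ " / " ++ PySem.Int.toStr tp ++ "</span>")
    ++ nxt_m ++ "\n</nav>"

-- ===== PRECONDITION & SPEC =====
-- Pre_ excludes exactly the inputs where the Python (both A and B, at the same accesses)
-- raises IndexError on pages[current_index-1] / pages[current_index+1].
def Pre_generate_pagination (current_index : Int) (total_pages : Int) (pages : List String) : Prop :=
  (current_index > 0 → PySem.Raise.InRange pages.length (current_index - 1)) ∧
  (current_index < total_pages - 1 → PySem.Raise.InRange pages.length (current_index + 1))
instance (current_index : Int) (total_pages : Int) (pages : List String) : Decidable (Pre_generate_pagination current_index total_pages pages) := by unfold Pre_generate_pagination; infer_instance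

def pvWitness_generate_pagination : Int × Int × List String := (1, 3, ["a.html", "b.html", "c.html"])

def Spec_generate_pagination (current_index : Int) (total_pages : Int) (pages : List String) (out : String) : Prop := out = generate_pagination_alt current_index total_pages pages
instance (current_index : Int) (total_pages : Int) (pages : List String) (out : String) : Decidable (Spec_generate_pagination current_index total_pages pages out) := by unfold Spec_generate_pagination; infer_instance

-- ===== CLAIM (what is proved, stated in full; the proofs are below) =====
def Claim_equal_generate_pagination : Prop := ∀ (current_index : Int) (total_pages : Int) (pages : List String), Dom_generate_pagination current_index total_pages pages → Pre_generate_pagination current_index total_pages pages → Spec_generate_pagination current_index total_pages pages (generate_pagination current_index total_pages pages)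

-- ===== LEMMAS AND PROOFS =====

-- concatenation of the emissions of a list
def pvConcat {α : Type} (f : α → String) (l : List α) : String :=
  l.foldl (fun s x => s ++ f x) ""

theorem pvFoldl_out {α : Type} (f : α → String) :
    ∀ (l : List α) (acc : String), l.foldl (fun s x => s ++ f x) acc = acc ++ pvConcat f l
  | [], acc => by simp [pvConcat]
  | a :: l, acc => by
      have h1 := pvFoldl_out f l (acc ++ f a)
      have h2 := pvFoldl_out f l ("" ++ f a)
      simp only [pvConcat, List.foldl] at *
      rw [h1, h2, String.empty_append, String.append_assoc]

theorem pvConcat_cons {α : Type} (f : α → String) (a : α) (l : List α) :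
    pvConcat f (a :: l) = f a ++ pvConcat f l := by
  simpa [pvConcat, List.foldl] using pvFoldl_out f l ("" ++ f a)

-- dropping ""-emitting elements does not change the concatenation
theorem pvConcat_filter {α : Type} (f : α → String) (p : α → Bool) :
    ∀ (l : List α), (∀ x ∈ l, p x = false → f x = "") →
      pvConcat f l = pvConcat f (l.filter p)
  | [], _ => rfl
  | a :: l, h => by
      have ih := pvConcat_filter f p l (fun x hx => h x (List.mem_cons_of_mem a hx))
      by_cases hp : p a
      · simp [hp, pvConcat_cons, ih]
      · have : f a = "" := h a (List.mem_cons_self) (by simpa using hp)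
        simp [hp, pvConcat_cons, ih, this]

-- A's loop body appends a per-index emission
def pvEmitA (ci tp : Int) (p : Int × String) : String := pvStepA ci tp "" p

theorem pvStepA_eq (ci tp : Int) (acc : String) (p : Int × String) :
    pvStepA ci tp acc p = acc ++ pvEmitA ci tp p := by
  unfold pvEmitA pvStepA
  split_ifs <;> simp

theorem pvFoldA (ci tp : Int) (l : List (Int × String)) (acc : String) :
    l.foldl (pvStepA ci tp) acc = acc ++ pvConcat (pvEmitA ci tp) l := by
  have : pvStepA ci tp = fun s x => s ++ pvEmitA ci tp x := by
    funext s x; exact pvStepA_eq ci tp s x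
  rw [this, pvFoldl_out]

-- A's emission at (j, pages[j]) is B's render(j), for every Int j
theorem pvEmit_eq_render (ci tp : Int) (pages : List String) (j : Int) :
    pvEmitA ci tp (j, PySem.List.pyGetD pages j "") = pvRenderB ci tp pages j := by
  unfold pvEmitA pvStepA pvRenderB
  split_ifs <;>
    first
      | rfl
      | (simp only [abs_le, not_or, not_and, not_le, not_lt] at * ; omega)

-- indices outside the candidate 9-tuple render to ""
theorem pvRender_eq_empty (ci tp : Int) (pages : List String) (j : Int)
    (h : j ∉ ([0, 1, ci - 2, ci - 1, ci, ci + 1, ci + 2, tp - 2, tp - 1] : List Int)) :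
    pvRenderB ci tp pages j = "" := by
  simp only [List.mem_cons, List.not_mem_nil, or_false, not_or] at h
  unfold pvRenderB
  split_ifs <;>
    first
      | rfl
      | (simp only [abs_le, not_or, not_and, not_le, not_lt] at * ; omega)

-- the sorted deduplicated candidate list IS the filtered range
theorem pvCandEq (ci tp : Int) (pages : List String) :
    PySem.List.sorted
      (PySem.Set.ofList (([0, 1, ci - 2, ci - 1, ci, ci + 1, ci + 2, tp - 2, tp - 1] : List Int).filter
        (fun i => decide (0 ≤ i ∧ i < (pages.length : Int)))))
      (fun x => x)
    = (PySem.List.pyRange 0 (PySem.List.len pages)).filter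
        (fun i => decide (i ∈ PySem.Set.ofList (([0, 1, ci - 2, ci - 1, ci, ci + 1, ci + 2, tp - 2, tp - 1] : List Int).filter
          (fun i => decide (0 ≤ i ∧ i < (pages.length : Int)))))) := by
  have hlen : PySem.List.len pages = ((pages.length : Nat) : Int) := by
    simp [PySem.List.len]
  have hrng : (PySem.List.pyRange 0 (PySem.List.len pages)).Pairwise (· < ·) := by
    rw [hlen, PySem.List.pyRange_zero_natCast, List.pairwise_map]
    exact List.pairwise_lt_range.imp (fun h => by exact_mod_cast h)
  have hfilt : ((PySem.List.pyRange 0 (PySem.List.len pages)).filter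
      (fun i => decide (i ∈ PySem.Set.ofList (([0, 1, ci - 2, ci - 1, ci, ci + 1, ci + 2, tp - 2, tp - 1] : List Int).filter
        (fun i => decide (0 ≤ i ∧ i < (pages.length : Int))))))).Pairwise (· < ·) :=
    hrng.sublist List.filter_sublist
  apply PySem.List.sorted_eq_of_perm_of_pairwise_lt _ _ _ _ hfilt
  rw [List.perm_ext_iff_of_nodup (hfilt.imp (fun h => ne_of_lt h)) (PySem.Set.nodup_ofList _)]
  intro x
  simp only [List.mem_filter, PySem.List.mem_pyRange_one, PySem.Set.mem_ofList,
    decide_eq_true_eq, hlen]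
  constructor
  · rintro ⟨-, hx⟩; exact hx
  · rintro ⟨hmem, hb⟩
    refine ⟨⟨hb.1, by exact_mod_cast hb.2⟩, hmem, hb⟩

theorem generate_pagination_spec' (current_index total_pages : Int) (pages : List String) :
    generate_pagination current_index total_pages pages
      = generate_pagination_alt current_index total_pages pages := by
  simp only [generate_pagination, generate_pagination_alt]
  rw [PySem.List.enumerate_eq_map_pyRange pages "", pvFoldA]
  have hmap : pvConcat (pvEmitA current_index total_pages)
      ((PySem.List.pyRange 0 (PySem.List.len pages)).map (fun j => (j, PySem.List.pyGetD pages j "")))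
      = pvConcat (pvRenderB current_index total_pages pages) (PySem.List.pyRange 0 (PySem.List.len pages)) := by
    simp only [pvConcat, List.foldl_map]
    congr 1
    funext s j
    rw [pvEmit_eq_render]
  have hfilter : pvConcat (pvRenderB current_index total_pages pages) (PySem.List.pyRange 0 (PySem.List.len pages))
      = pvConcat (pvRenderB current_index total_pages pages)
          ((PySem.List.pyRange 0 (PySem.List.len pages)).filter
            (fun i => decide (i ∈ PySem.Set.ofList (([0, 1, current_index - 2, current_index - 1, current_index,
              current_index + 1, current_index + 2, total_pages - 2, total_pages - 1] : List Int).filter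
              (fun i => decide (0 ≤ i ∧ i < (pages.length : Int))))))) := by
    apply pvConcat_filter
    intro x hx hfalse
    apply pvRender_eq_empty
    intro hmem
    rw [PySem.List.mem_pyRange_one] at hx
    have hxlen : x < (pages.length : Int) := by
      have hlen : PySem.List.len pages = ((pages.length : Nat) : Int) := by simp [PySem.List.len]
      rw [hlen] at hx; exact_mod_cast hx.2
    have : x ∈ PySem.Set.ofList (([0, 1, current_index - 2, current_index - 1, current_index,
        current_index + 1, current_index + 2, total_pages - 2, total_pages - 1] : List Int).filter
        (fun i => decide (0 ≤ i ∧ i < (pages.length : Int)))) := by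
      rw [PySem.Set.mem_ofList, List.mem_filter]
      exact ⟨hmem, by simp [hx.1, hxlen]⟩
    simp only [decide_eq_false_iff_not] at hfalse
    exact hfalse this
  have hjoin : ∀ (l : List Int),
      (l.map (pvRenderB current_index total_pages pages)).foldl (· ++ ·) ""
        = pvConcat (pvRenderB current_index total_pages pages) l := by
    intro l; simp [pvConcat, List.foldl_map]
  rw [hmap, hfilter, ← pvCandEq, hjoin]
  split_ifs <;> simp only [String.append_assoc]

-- ===== VERDICT (by name: the statement is the Claim_ definition above) =====
theorem generate_pagination_spec : Claim_equal_generate_pagination := by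
  intro ci tp pages _ _
  unfold Spec_generate_pagination
  exact generate_pagination_spec' ci tp pages
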